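-- pv_equiv track=rewrite | github.com/aitechy226/soterralabs-site | render/anvil/build.py | _select_canonical_evidence
-- ===== SOURCE A (Python) =====
-- _EVIDENCE_PRIORITY: tuple[str, ...] = (
--     "github_file",
--     "github_release",
--     "github_api",
--     "docker_hub",
--     "ghcr",
--     "ngc",
-- )
--
-- def _select_canonical_evidence(rows: list[tuple]) -> tuple:
--     """Return the canonical row from 1+ Evidence rows for one fact.
--
--     Priority by source_type (above), tiebreak by lowest ev.id (the
--     extractor's first emission — same as Wave 1E.1's foundational
--     behavior). Unknown source_types fall to lowest-id within their
--     own bucket; if no row matches the priority list, the first row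
--     by id is returned (preserves 1E.1 behavior for unknown shapes).
--
--     Raises ValueError on empty input. The current call site builds
--     `rows` from a LEFT JOIN on evidence_links — an unmatched fact
--     row materializes as a length-1 list with all-None evidence
--     columns, NOT a length-0 list. But a future refactor that
--     pre-filters None-id rows would silently change the contract;
--     the explicit guard converts a latent IndexError into a
--     diagnostic.
--
--     Source layer: ENGINEERING (github_file preference is a buyer-
--     credibility judgment — the SHA-pinned source is the most
--     verifiable evidence in 1 click).
--     """
--     if not rows:
--         raise ValueError(
--             "_select_canonical_evidence called with empty rows list"
--         )
--     if len(rows) == 1: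
--         return rows[0]
--     # Pre-sorted by ev.id ASC from the SQL ORDER BY. Walk preference
--     # list; first matching source_type wins.
--     for preferred in _EVIDENCE_PRIORITY:
--         for row in rows:
--             if row[8] == preferred:  # row[8] = ev.source_type
--                 return row
--     # No preferred source_type matched — fall back to first by id.
--     return rows[0]
-- ===== SOURCE B (Python) =====
-- _EVIDENCE_PRIORITY: tuple[str, ...] = (
--     "github_file",
--     "github_release",
--     "github_api",
--     "docker_hub",
--     "ghcr",
--     "ngc",
-- )
--
-- _PRIO_INDEX = {t: i for i, t in enumerate(_EVIDENCE_PRIORITY)}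
--
--
-- def _select_canonical_evidence(rows: list[tuple]) -> tuple:
--     """Single min-tracking pass: priority index per row, strict '<' keeps the
--     first (lowest-id) row on ties; unknown source_types get a sentinel index."""
--     if not rows:
--         raise ValueError(
--             "_select_canonical_evidence called with empty rows list"
--         )
--     if len(rows) == 1:
--         return rows[0]
--     sentinel = len(_EVIDENCE_PRIORITY)
--     best_row = rows[0]
--     best_idx = _PRIO_INDEX.get(rows[0][8], sentinel)
--     for row in rows[1:]:
--         idx = _PRIO_INDEX.get(row[8], sentinel)
--         if idx < best_idx:
--             best_row, best_idx = row, idx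
--     return best_row
-- ===== Notes on version B (the rewrite author's own statement) =====
-- stated objective: alternative
-- what changed: Replaces the nested walk (for each priority, scan all rows) with one precomputed source_type->index dict plus a single strict-min-tracking pass over the rows.
import Mathlib
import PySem

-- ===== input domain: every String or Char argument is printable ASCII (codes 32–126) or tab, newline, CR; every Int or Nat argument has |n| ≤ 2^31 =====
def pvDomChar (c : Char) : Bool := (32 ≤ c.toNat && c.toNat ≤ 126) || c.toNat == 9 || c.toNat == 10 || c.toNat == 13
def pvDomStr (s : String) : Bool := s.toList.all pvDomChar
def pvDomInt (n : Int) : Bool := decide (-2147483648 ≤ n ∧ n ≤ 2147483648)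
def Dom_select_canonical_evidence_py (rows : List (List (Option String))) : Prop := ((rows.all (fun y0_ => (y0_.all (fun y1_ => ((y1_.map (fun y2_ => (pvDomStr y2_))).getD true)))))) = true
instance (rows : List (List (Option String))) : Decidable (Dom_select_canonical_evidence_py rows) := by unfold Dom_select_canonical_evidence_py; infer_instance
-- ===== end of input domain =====

-- B replaces A's nested priority-outer/rows-inner scans by one precomputed
-- source_type→index dict plus a single strict-min-tracking pass (objective: alternative).

-- ===== PORT A =====
def pvEvidencePriority : List String :=
  ["github_file", "github_release", "github_api", "docker_hub", "ghcr", "ngc"]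

-- outer loop of A over _EVIDENCE_PRIORITY; the inner `for row in rows: if row[8] == preferred: return row`
-- is the find? of the first row whose 9th field equals the preferred source_type
def pvFindByPrio : List String → List (List (Option String)) → Option (List (Option String))
  | [], _ => none
  | p :: ps, rows =>
    match rows.find? (fun r => PySem.List.pyGet? r 8 == some (some p)) with
    | some r => some r
    | none => pvFindByPrio ps rows

def select_canonical_evidence_py (rows : List (List (Option String))) : List (Option String) :=
  match rows with
  | [] => []            -- ValueError in Python; excluded by Pre_
  | [r] => r
  | r :: rest =>
    match pvFindByPrio pvEvidencePriority (r :: rest) with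
    | some x => x
    | none => r

-- ===== PORT B =====
def pvEvidencePriorityB : List String :=
  ["github_file", "github_release", "github_api", "docker_hub", "ghcr", "ngc"]

-- _PRIO_INDEX = {t: i for i, t in enumerate(_EVIDENCE_PRIORITY)}
def pvPrioDict : PySem.Dict String Int :=
  (PySem.List.enumerate pvEvidencePriorityB).foldl
    (fun d p => PySem.Dict.insert d p.2 p.1) PySem.Dict.empty

-- _PRIO_INDEX.get(row[8], sentinel); row[8] missing (IndexError) is outside Pre_
def pvIdxOf (x : Option (Option String)) : Int :=
  match x with
  | some (some s) => PySem.Dict.getD pvPrioDict s 6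
  | _ => 6

def pvBLoop : List (Option String) → Int → List (List (Option String)) → List (Option String)
  | best, _, [] => best
  | best, bidx, r :: rs =>
    let i := pvIdxOf (PySem.List.pyGet? r 8)
    if i < bidx then pvBLoop r i rs else pvBLoop best bidx rs

def select_canonical_evidence_py_alt (rows : List (List (Option String))) : List (Option String) :=
  match rows with
  | [] => []            -- ValueError in Python
  | r :: rest =>
    if rest.isEmpty then r
    else pvBLoop r (pvIdxOf (PySem.List.pyGet? r 8)) rest

-- ===== PRECONDITION & SPEC =====
-- Pre_ excludes the empty list (A raises ValueError) and multi-row inputs containing a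
-- row with fewer than 9 fields: row[8] raises IndexError on every row A's scan touches,
-- and A may return before touching a short row placed after a match (see cites).
def Pre_select_canonical_evidence_py (rows : List (List (Option String))) : Prop :=
  rows ≠ [] ∧ (rows.length = 1 ∨ ∀ r ∈ rows, 9 ≤ r.length)
instance (rows : List (List (Option String))) : Decidable (Pre_select_canonical_evidence_py rows) := by
  unfold Pre_select_canonical_evidence_py; infer_instance

def pvWitness_select_canonical_evidence_py : List (List (Option String)) :=
  [[none, none, none, none, none, none, none, none, some "github_file"]]

def Spec_select_canonical_evidence_py (rows : List (List (Option String))) (out : List (Option String)) : Prop := out = select_canonical_evidence_py_alt rows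
instance (rows : List (List (Option String))) (out : List (Option String)) : Decidable (Spec_select_canonical_evidence_py rows out) := by unfold Spec_select_canonical_evidence_py; infer_instance

-- ===== CLAIM (what is proved, stated in full; the proofs are below) =====
def Claim_equal_select_canonical_evidence_py : Prop := ∀ (rows : List (List (Option String))), Dom_select_canonical_evidence_py rows → Pre_select_canonical_evidence_py rows → Spec_select_canonical_evidence_py rows (select_canonical_evidence_py rows)

-- ===== LEMMAS AND PROOFS =====

-- priority index of a (possibly absent) row[8] value
def pvIdxRow (r : List (Option String)) : Int := pvIdxOf (PySem.List.pyGet? r 8)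

-- minimum priority index over a list of rows (6 = sentinel)
def pvMinIdx (rows : List (List (Option String))) : Int := (rows.map pvIdxRow).foldr min 6

lemma pvIdxOf_some (s : String) : PySem.Dict.getD pvPrioDict s 6 =
    (if s = "github_file" then 0 else if s = "github_release" then 1 else
     if s = "github_api" then 2 else if s = "docker_hub" then 3 else
     if s = "ghcr" then 4 else if s = "ngc" then 5 else 6) := by
  have hd : pvPrioDict = (((((PySem.Dict.empty.insert "github_file" 0).insert
      "github_release" 1).insert "github_api" 2).insert "docker_hub" 3).insert
      "ghcr" 4).insert "ngc" 5 := by rfl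
  rw [hd]
  by_cases h0 : s = "github_file"; · subst h0; rfl
  by_cases h1 : s = "github_release"; · subst h1; rfl
  by_cases h2 : s = "github_api"; · subst h2; rfl
  by_cases h3 : s = "docker_hub"; · subst h3; rfl
  by_cases h4 : s = "ghcr"; · subst h4; rfl
  by_cases h5 : s = "ngc"; · subst h5; rfl
  simp [h0, h1, h2, h3, h4, h5, PySem.Dict.getD_insert_of_ne]

lemma pvIdxOf_bounds (x : Option (Option String)) : 0 ≤ pvIdxOf x ∧ pvIdxOf x ≤ 6 := by
  match x with
  | none => exact ⟨by norm_num [pvIdxOf], by norm_num [pvIdxOf]⟩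
  | some none => exact ⟨by norm_num [pvIdxOf], by norm_num [pvIdxOf]⟩
  | some (some s) =>
    have h : pvIdxOf (some (some s)) = PySem.Dict.getD pvPrioDict s 6 := rfl
    rw [h, pvIdxOf_some]
    split_ifs <;> norm_num

lemma pvMatch_eq (k : Nat) (hk : k < 6) (x : Option (Option String)) :
    (x == some (some (pvEvidencePriority[k]'(by simpa [pvEvidencePriority] using hk)))) =
    (pvIdxOf x == (k : Int)) := by
  match x with
  | none => interval_cases k <;> rfl
  | some none => interval_cases k <;> rfl
  | some (some s) =>
    have h : pvIdxOf (some (some s)) = PySem.Dict.getD pvPrioDict s 6 := rfl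
    rw [h, pvIdxOf_some]
    interval_cases k <;>
      simp only [pvEvidencePriority, List.getElem_cons_zero, List.getElem_cons_succ] <;>
      split_ifs <;> simp_all

lemma pvMinIdx_cons (r : List (Option String)) (rs : List (List (Option String))) :
    pvMinIdx (r :: rs) = min (pvIdxRow r) (pvMinIdx rs) := rfl

lemma pvMinIdx_le_six (rows : List (List (Option String))) : pvMinIdx rows ≤ 6 := by
  induction rows with
  | nil => norm_num [pvMinIdx]
  | cons r rs ih => rw [pvMinIdx_cons]; exact le_trans (min_le_right _ _) ih

lemma pvMinIdx_le (rows : List (List (Option String))) (r : List (Option String)) (h : r ∈ rows) :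
    pvMinIdx rows ≤ pvIdxRow r := by
  induction rows with
  | nil => cases h
  | cons a rs ih =>
    rw [pvMinIdx_cons]
    rcases List.mem_cons.1 h with h | h
    · subst h; exact min_le_left _ _
    · exact le_trans (min_le_right _ _) (ih h)

lemma pvMinIdx_ge (rows : List (List (Option String))) (c : Int) (hc : c ≤ 6)
    (h : ∀ r ∈ rows, c ≤ pvIdxRow r) : c ≤ pvMinIdx rows := by
  induction rows with
  | nil => simpa [pvMinIdx] using hc
  | cons a rs ih =>
    rw [pvMinIdx_cons]
    exact le_min (h a (List.mem_cons_self ..)) (ih (fun r hr => h r (List.mem_cons_of_mem _ hr)))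

lemma pvMinIdx_attained (rows : List (List (Option String))) (h : pvMinIdx rows < 6) :
    ∃ r ∈ rows, pvIdxRow r = pvMinIdx rows := by
  induction rows with
  | nil => norm_num [pvMinIdx] at h
  | cons a rs ih =>
    rw [pvMinIdx_cons] at h ⊢
    by_cases hle : pvIdxRow a ≤ pvMinIdx rs
    · exact ⟨a, List.mem_cons_self .., (min_eq_left hle).symm⟩
    · push Not at hle
      obtain ⟨r, hr, he⟩ := ih (by omega)
      exact ⟨r, List.mem_cons_of_mem _ hr, by rw [he, min_eq_right (le_of_lt hle)]⟩

lemma pvFind_isSome (a : List (Option String)) (rs : List (List (Option String))) :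
    ((a :: rs).find? (fun x => pvIdxRow x == pvMinIdx (a :: rs))).isSome := by
  rw [List.find?_isSome]
  by_cases hm : pvMinIdx (a :: rs) < 6
  · obtain ⟨r, hr, he⟩ := pvMinIdx_attained _ hm
    exact ⟨r, hr, by simpa using he⟩
  · have h6 : pvMinIdx (a :: rs) = 6 := le_antisymm (pvMinIdx_le_six _) (by omega)
    have h1 := pvMinIdx_le (a :: rs) a (List.mem_cons_self ..)
    have h2 : pvIdxRow a ≤ 6 := (pvIdxOf_bounds _).2
    exact ⟨a, List.mem_cons_self .., by simp only [beq_iff_eq]; omega⟩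

lemma pvAux (n : Nat) : ∀ (k : Nat), k + n = 6 → ∀ rows,
    (∀ r ∈ rows, (k : Int) ≤ pvIdxRow r) →
    pvFindByPrio (pvEvidencePriority.drop k) rows =
      if pvMinIdx rows < 6 then rows.find? (fun r => pvIdxRow r == pvMinIdx rows) else none := by
  induction n with
  | zero =>
    intro k hk rows hlo
    have hk6 : k = 6 := by omega
    subst hk6
    have h6 : (6 : Int) ≤ pvMinIdx rows := pvMinIdx_ge rows 6 le_rfl hlo
    rw [if_neg (by omega)]
    rfl
  | succ n ih =>
    intro k hk rows hlo
    have hk5 : k < 6 := by omega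
    have hdrop : pvEvidencePriority.drop k =
        pvEvidencePriority[k]'(by simpa [pvEvidencePriority] using hk5) ::
        pvEvidencePriority.drop (k + 1) :=
      List.drop_eq_getElem_cons (by simpa [pvEvidencePriority] using hk5)
    rw [hdrop]
    have hpred : (fun r => PySem.List.pyGet? r 8 ==
        some (some (pvEvidencePriority[k]'(by simpa [pvEvidencePriority] using hk5)))) =
        (fun r => pvIdxRow r == (k : Int)) := by
      funext r
      exact pvMatch_eq k hk5 (PySem.List.pyGet? r 8)
    show (match rows.find? (fun r => PySem.List.pyGet? r 8 == _) with
          | some r => some r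
          | none => pvFindByPrio (pvEvidencePriority.drop (k + 1)) rows) = _
    rw [hpred]
    cases hfind : rows.find? (fun r => pvIdxRow r == (k : Int)) with
    | some r0 =>
      have hmem : r0 ∈ rows := List.mem_of_find?_eq_some hfind
      have heq : pvIdxRow r0 = (k : Int) := by
        have := List.find?_some hfind
        simpa using this
      have hmin : pvMinIdx rows = (k : Int) :=
        le_antisymm (heq ▸ pvMinIdx_le rows r0 hmem)
          (pvMinIdx_ge rows k (by exact_mod_cast hk5.le) hlo)
      rw [if_pos (by omega), hmin, hfind]
    | none =>
      have hnone : ∀ r ∈ rows, ¬(pvIdxRow r == (k : Int)) = true := by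
        intro r hr
        exact List.find?_eq_none.1 hfind r hr
      have hlo' : ∀ r ∈ rows, ((k + 1 : Nat) : Int) ≤ pvIdxRow r := by
        intro r hr
        have h1 := hlo r hr
        have h2 := hnone r hr
        simp only [beq_iff_eq] at h2
        push_cast
        omega
      exact ih (k + 1) (by omega) rows hlo'

lemma pvBLoop_spec (rs : List (List (Option String))) : ∀ (best : List (Option String)),
    pvBLoop best (pvIdxRow best) rs =
      ((best :: rs).find? (fun r => pvIdxRow r == pvMinIdx (best :: rs))).getD best := by
  induction rs with
  | nil =>
    intro best
    have : pvMinIdx [best] = pvIdxRow best := by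
      rw [pvMinIdx_cons]
      exact min_eq_left (by simpa [pvMinIdx] using (pvIdxOf_bounds _).2)
    simp [pvBLoop, this, List.find?_cons_of_pos]
  | cons r rs ih =>
    intro best
    show (if pvIdxRow r < pvIdxRow best then pvBLoop r (pvIdxRow r) rs
          else pvBLoop best (pvIdxRow best) rs) = _
    by_cases hlt : pvIdxRow r < pvIdxRow best
    · rw [if_pos hlt, ih r]
      have hm : pvMinIdx (best :: r :: rs) = pvMinIdx (r :: rs) := by
        simp only [pvMinIdx_cons]
        omega
      have hb : ¬(pvIdxRow best == pvMinIdx (best :: r :: rs)) = true := by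
        have h1 : pvMinIdx (r :: rs) ≤ pvIdxRow r := pvMinIdx_le _ r (List.mem_cons_self ..)
        simp only [beq_iff_eq, hm]
        omega
      rw [List.find?_cons_of_neg (p := fun x => pvIdxRow x == pvMinIdx (best :: r :: rs)) hb, hm]
      obtain ⟨x, hx⟩ := Option.isSome_iff_exists.1 (pvFind_isSome r rs)
      rw [hx]
      rfl
    · rw [if_neg hlt, ih best]
      have hble : pvIdxRow best ≤ pvIdxRow r := by omega
      have hm : pvMinIdx (best :: r :: rs) = pvMinIdx (best :: rs) := by
        simp only [pvMinIdx_cons]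
        omega
      rw [hm]
      by_cases hb : pvIdxRow best = pvMinIdx (best :: rs)
      · rw [List.find?_cons_of_pos (p := fun x => pvIdxRow x == pvMinIdx (best :: rs)) (l := r :: rs) (by simpa using hb),
            List.find?_cons_of_pos (p := fun x => pvIdxRow x == pvMinIdx (best :: rs)) (l := rs) (by simpa using hb)]
      · have hminle : pvMinIdx (best :: rs) ≤ pvIdxRow best :=
          pvMinIdx_le _ best (List.mem_cons_self ..)
        have hr : ¬(pvIdxRow r == pvMinIdx (best :: rs)) = true := by
          simp only [beq_iff_eq]
          omega
        rw [List.find?_cons_of_neg (p := fun x => pvIdxRow x == pvMinIdx (best :: rs)) (l := r :: rs) (by simpa using hb),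
            List.find?_cons_of_neg (p := fun x => pvIdxRow x == pvMinIdx (best :: rs)) (l := rs) (by simpa using hb),
            List.find?_cons_of_neg (p := fun x => pvIdxRow x == pvMinIdx (best :: rs)) hr]

-- ===== VERDICT (by name: the statement is the Claim_ definition above) =====
theorem select_canonical_evidence_py_spec : Claim_equal_select_canonical_evidence_py := by
  intro rows _hdom hpre
  unfold Spec_select_canonical_evidence_py
  match rows with
  | [] => exact absurd rfl hpre.1
  | [r] => rfl
  | a :: b :: t =>
    have haux := pvAux 6 0 rfl (a :: b :: t)
      (fun r _ => by simpa using (pvIdxOf_bounds (PySem.List.pyGet? r 8)).1)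
    have hA : select_canonical_evidence_py (a :: b :: t) =
        match pvFindByPrio pvEvidencePriority (a :: b :: t) with
        | some x => x
        | none => a := rfl
    have hB : select_canonical_evidence_py_alt (a :: b :: t) =
        pvBLoop a (pvIdxRow a) (b :: t) := rfl
    rw [hA, hB, pvBLoop_spec]
    have hdrop0 : pvEvidencePriority.drop 0 = pvEvidencePriority := rfl
    rw [hdrop0] at haux
    by_cases hm : pvMinIdx (a :: b :: t) < 6
    · rw [haux, if_pos hm]
      obtain ⟨r, hr, he⟩ := pvMinIdx_attained _ hm
      have hsome : ((a :: b :: t).find? (fun r => pvIdxRow r == pvMinIdx (a :: b :: t))).isSome := by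
        rw [List.find?_isSome]
        exact ⟨r, hr, by simpa using he⟩
      obtain ⟨x, hx⟩ := Option.isSome_iff_exists.1 hsome
      rw [hx]
      rfl
    · rw [haux, if_neg hm]
      have h6 : pvMinIdx (a :: b :: t) = 6 :=
        le_antisymm (pvMinIdx_le_six _) (by omega)
      have ha6 : pvIdxRow a = 6 := by
        have h1 := pvMinIdx_le (a :: b :: t) a (List.mem_cons_self ..)
        have h2 : pvIdxRow a ≤ 6 := (pvIdxOf_bounds _).2
        omega
      rw [List.find?_cons_of_pos (p := fun x => pvIdxRow x == pvMinIdx (a :: b :: t)) (by simp [ha6, h6])]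
      rfl
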